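-- pv_equiv track=rewrite | github.com/Andalu30/US-MC-TrabajoACO | ClaseSMTTP.py | opt2Strategy
-- ===== SOURCE A (Python) =====
-- from itertools import permutations
--
-- def opt2Strategy(circuitoMejoractual, pesoMejorSolucionactual, pTime):
--
--     aunMejorCircuito = circuitoMejoractual
--     aunMejorPeso = pesoMejorSolucionactual
--
--     perms = permutations(circuitoMejoractual)
--
--     for p in perms:
--         peso = 0
--         for (i,j) in p:
--             peso = peso + pTime[i][j]
--
--         if peso < aunMejorPeso:
--             aunMejorCircuito = p
--             aunMejorPeso = peso
--
--     return aunMejorCircuito, aunMejorPeso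
-- ===== SOURCE B (Python) =====
-- def opt2Strategy(circuitoMejoractual, pesoMejorSolucionactual, pTime):
--     # The weight of a circuit is the sum of its edge weights, which is invariant
--     # under any permutation of the edge list: the only permutation that can beat
--     # the incumbent is the first one (the input order itself). Sum once, compare.
--     peso = sum(pTime[i][j] for (i, j) in circuitoMejoractual)
--     if peso < pesoMejorSolucionactual:
--         return tuple(circuitoMejoractual), peso
--     return circuitoMejoractual, pesoMejorSolucionactual
-- ===== Notes on version B (the rewrite author's own statement) =====
-- stated objective: faster
-- what changed: B sums the edge weights once and compares to the incumbent, exploiting that the weight is invariant under edge-order permutation, instead of enumerating all n! permutations.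
import Mathlib
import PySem

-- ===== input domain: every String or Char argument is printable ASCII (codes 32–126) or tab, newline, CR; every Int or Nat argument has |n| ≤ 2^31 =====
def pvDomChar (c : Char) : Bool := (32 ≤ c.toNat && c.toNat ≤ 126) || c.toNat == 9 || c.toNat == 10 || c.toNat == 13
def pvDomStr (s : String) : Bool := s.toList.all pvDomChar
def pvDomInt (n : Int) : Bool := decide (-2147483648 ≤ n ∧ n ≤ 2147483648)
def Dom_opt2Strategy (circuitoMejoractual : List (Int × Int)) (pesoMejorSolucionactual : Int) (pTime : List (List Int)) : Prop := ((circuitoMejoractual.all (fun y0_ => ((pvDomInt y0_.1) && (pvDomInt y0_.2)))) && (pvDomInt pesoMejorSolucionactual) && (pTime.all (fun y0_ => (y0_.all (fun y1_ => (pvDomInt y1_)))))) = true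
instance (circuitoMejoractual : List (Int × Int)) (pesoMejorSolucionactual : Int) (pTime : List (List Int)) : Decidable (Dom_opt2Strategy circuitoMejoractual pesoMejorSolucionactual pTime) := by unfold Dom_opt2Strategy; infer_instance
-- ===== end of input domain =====

-- B replaces A's enumeration of all n! edge permutations by a single sum of the
-- edge weights (the weight is permutation-invariant), an asymptotic speed-up.

-- ===== PORT A =====
-- pTime[i][j] with Python index semantics; default 0 is only reached outside Pre_.
def pvEdgeW (pTime : List (List Int)) (ij : Int × Int) : Int :=
  (PySem.List.pyGet? ((PySem.List.pyGet? pTime ij.1).getD []) ij.2).getD 0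

-- itertools.permutations(xs) in its exact order: for each index i (ascending),
-- xs[i] prepended to each permutation of the rest; fuel = length of xs.
def pvPermsAux : Nat → List (Int × Int) → List (List (Int × Int))
  | 0, _ => [[]]
  | Nat.succ n, xs =>
      (List.range xs.length).flatMap (fun i =>
        (pvPermsAux n (xs.take i ++ xs.drop (i + 1))).map (fun r => (xs[i]?.getD (0, 0)) :: r))

def pvPerms (xs : List (Int × Int)) : List (List (Int × Int)) := pvPermsAux xs.length xs

def opt2Strategy (circuitoMejoractual : List (Int × Int)) (pesoMejorSolucionactual : Int) (pTime : List (List Int)) : (List (Int × Int)) × Int :=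
  (pvPerms circuitoMejoractual).foldl
    (fun st p =>
      let peso := p.foldl (fun acc ij => acc + pvEdgeW pTime ij) 0
      if peso < st.2 then (p, peso) else st)
    (circuitoMejoractual, pesoMejorSolucionactual)

-- ===== PORT B =====
def opt2Strategy_alt (circuitoMejoractual : List (Int × Int)) (pesoMejorSolucionactual : Int) (pTime : List (List Int)) : (List (Int × Int)) × Int :=
  let peso := (circuitoMejoractual.map (fun ij => pvEdgeW pTime ij)).sum
  if peso < pesoMejorSolucionactual then (circuitoMejoractual, peso)
  else (circuitoMejoractual, pesoMejorSolucionactual)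

-- ===== PRECONDITION & SPEC =====
-- Pre_ excludes exactly the inputs where pTime[i][j] raises IndexError in Python A
-- (and in B): every edge must be a valid (possibly negative) Python index pair.
def Pre_opt2Strategy (circuitoMejoractual : List (Int × Int)) (pesoMejorSolucionactual : Int) (pTime : List (List Int)) : Prop :=
  ∀ ij ∈ circuitoMejoractual,
    PySem.Raise.InRange pTime.length ij.1 ∧
    PySem.Raise.InRange ((PySem.List.pyGet? pTime ij.1).getD []).length ij.2
instance (circuitoMejoractual : List (Int × Int)) (pesoMejorSolucionactual : Int) (pTime : List (List Int)) : Decidable (Pre_opt2Strategy circuitoMejoractual pesoMejorSolucionactual pTime) := by unfold Pre_opt2Strategy; infer_instance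

def pvWitness_opt2Strategy : (List (Int × Int)) × Int × List (List Int) :=
  ([(0, 1), (1, 0)], 10, [[0, 3], [4, 0]])

def Spec_opt2Strategy (circuitoMejoractual : List (Int × Int)) (pesoMejorSolucionactual : Int) (pTime : List (List Int)) (out : (List (Int × Int)) × Int) : Prop := out = opt2Strategy_alt circuitoMejoractual pesoMejorSolucionactual pTime
instance (circuitoMejoractual : List (Int × Int)) (pesoMejorSolucionactual : Int) (pTime : List (List Int)) (out : (List (Int × Int)) × Int) : Decidable (Spec_opt2Strategy circuitoMejoractual pesoMejorSolucionactual pTime out) := by unfold Spec_opt2Strategy; infer_instance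

-- ===== CLAIM (what is proved, stated in full; the proofs are below) =====
def Claim_equal_opt2Strategy : Prop := ∀ (circuitoMejoractual : List (Int × Int)) (pesoMejorSolucionactual : Int) (pTime : List (List Int)), Dom_opt2Strategy circuitoMejoractual pesoMejorSolucionactual pTime → Pre_opt2Strategy circuitoMejoractual pesoMejorSolucionactual pTime → Spec_opt2Strategy circuitoMejoractual pesoMejorSolucionactual pTime (opt2Strategy circuitoMejoractual pesoMejorSolucionactual pTime)

-- ===== LEMMAS AND PROOFS =====

-- every element of pvPermsAux n xs (n = xs.length) is a permutation of xs
theorem pvPermsAux_perm : ∀ (n : Nat) (xs : List (Int × Int)), n = xs.length →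
    ∀ p ∈ pvPermsAux n xs, p.Perm xs := by
  intro n
  induction n with
  | zero =>
      intro xs h p hp
      simp [pvPermsAux] at hp
      subst hp
      have : xs = [] := List.length_eq_zero_iff.mp h.symm
      simp [this]
  | succ n ih =>
      intro xs h p hp
      simp only [pvPermsAux, List.mem_flatMap, List.mem_range, List.mem_map] at hp
      obtain ⟨i, hi, r, hr, rfl⟩ := hp
      have hlen : n = (xs.take i ++ xs.drop (i + 1)).length := by
        simp [List.length_take, List.length_drop]
        omega
      have hperm := ih _ hlen r hr
      have hget : xs[i]?.getD (0, 0) = xs[i] := by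
        simp [List.getElem?_eq_getElem hi]
      rw [hget]
      have hx : xs = xs.take i ++ xs[i] :: xs.drop (i + 1) := by
        conv_lhs => rw [← List.take_append_drop i xs]
        rw [List.getElem_cons_drop hi]
      have : (xs[i] :: (xs.take i ++ xs.drop (i + 1))).Perm xs := by
        conv_rhs => rw [hx]
        exact List.perm_middle.symm
      exact (hperm.cons xs[i]).trans this

-- pvPermsAux n xs with n = xs.length starts with xs itself (itertools order)
theorem pvPermsAux_head : ∀ (n : Nat) (xs : List (Int × Int)), n = xs.length →
    ∃ rest, pvPermsAux n xs = xs :: rest := by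
  intro n
  induction n with
  | zero =>
      intro xs h
      have : xs = [] := List.length_eq_zero_iff.mp h.symm
      exact ⟨[], by simp [pvPermsAux, this]⟩
  | succ n ih =>
      intro xs h
      match xs, h with
      | x :: xs', h =>
        have hn : n = xs'.length := by simpa using h
        obtain ⟨r, hr⟩ := ih xs' hn
        refine ⟨?_, ?_⟩
        · exact (r.map (x :: ·)) ++
            ((List.range xs'.length).map (· + 1)).flatMap (fun i =>
              (pvPermsAux n ((x :: xs').take i ++ (x :: xs').drop (i + 1))).map
                (fun t => ((x :: xs')[i]?.getD (0, 0)) :: t))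
        · simp only [pvPermsAux, List.length_cons, List.range_succ_eq_map,
            List.flatMap_cons, List.flatMap_map]
          simp [hr]

-- peso loop = sum of mapped weights
theorem peso_eq_sum (pTime : List (List Int)) (p : List (Int × Int)) :
    p.foldl (fun acc ij => acc + pvEdgeW pTime ij) 0 =
      (p.map (fun ij => pvEdgeW pTime ij)).sum := by
  simpa using PySem.List.foldl_add (l := p) (g := fun ij => pvEdgeW pTime ij) (a := 0)

-- the fold over a list of equal-weight permutations never moves off a state with st.2 ≤ S
theorem fold_no_update (pTime : List (List Int)) (S : Int) :
    ∀ (L : List (List (Int × Int))) (st : (List (Int × Int)) × Int),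
      (∀ p ∈ L, (p.map (fun ij => pvEdgeW pTime ij)).sum = S) → st.2 ≤ S →
      L.foldl (fun st p =>
        let peso := p.foldl (fun acc ij => acc + pvEdgeW pTime ij) 0
        if peso < st.2 then (p, peso) else st) st = st := by
  intro L
  induction L with
  | nil => intro st _ _; rfl
  | cons p L ih =>
      intro st hL hle
      have hp : (p.map (fun ij => pvEdgeW pTime ij)).sum = S := hL p (by simp)
      have hnot : ¬ (p.foldl (fun acc ij => acc + pvEdgeW pTime ij) 0 < st.2) := by
        rw [peso_eq_sum, hp]; omega
      simp only [List.foldl_cons, if_neg hnot]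
      exact ih st (fun q hq => hL q (by simp [hq])) hle

-- ===== VERDICT (by name: the statement is the Claim_ definition above) =====
theorem opt2Strategy_spec : Claim_equal_opt2Strategy := by
  intro c w pT _ _
  unfold Spec_opt2Strategy opt2Strategy opt2Strategy_alt
  obtain ⟨rest, hrest⟩ := pvPermsAux_head c.length c rfl
  have hall : ∀ p ∈ pvPerms c, (p.map (fun ij => pvEdgeW pT ij)).sum =
      (c.map (fun ij => pvEdgeW pT ij)).sum := by
    intro p hp
    exact ((pvPermsAux_perm c.length c rfl p hp).map _).sum_eq
  set S := (c.map (fun ij => pvEdgeW pT ij)).sum with hS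
  have hrest' : ∀ p ∈ rest, (p.map (fun ij => pvEdgeW pT ij)).sum = S := by
    intro p hp
    exact hall p (by unfold pvPerms; rw [hrest]; simp [hp])
  unfold pvPerms
  rw [hrest, List.foldl_cons]
  have hstep : (if c.foldl (fun acc ij => acc + pvEdgeW pT ij) 0 < w
      then (c, c.foldl (fun acc ij => acc + pvEdgeW pT ij) 0) else ((c, w) : (List (Int × Int)) × Int))
      = if S < w then (c, S) else (c, w) := by
    rw [peso_eq_sum, ← hS]
  show List.foldl _ (if c.foldl (fun acc ij => acc + pvEdgeW pT ij) 0 < w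
      then (c, c.foldl (fun acc ij => acc + pvEdgeW pT ij) 0) else (c, w)) rest = _
  rw [hstep]
  by_cases h : S < w
  · simp only [if_pos h]
    exact fold_no_update pT S rest (c, S) hrest' (le_refl S)
  · simp only [if_neg h]
    exact fold_no_update pT S rest (c, w) hrest' (not_lt.mp h)
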